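-- pv_equiv track=rewrite | github.com/zeppeki/project-euler-first100 | problems/problem_042.py | generate_triangle_numbers
-- ===== SOURCE A (Python) =====
-- def generate_triangle_numbers(max_value: int) -> set[int]:
--     """
--     指定された最大値までの三角数を生成
--     時間計算量: O(√max_value)
--     空間計算量: O(√max_value)
--     """
--     triangle_numbers = set()
--     n = 1
--     while True:
--         triangle_num = n * (n + 1) // 2
--         if triangle_num > max_value:
--             break
--         triangle_numbers.add(triangle_num)
--         n += 1
--     return triangle_numbers
-- ===== SOURCE B (Python) =====
-- def generate_triangle_numbers(max_value: int) -> set[int]: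
--     if max_value < 0:
--         return set()
--     # Binary search for the largest n with n*(n+1)//2 <= max_value.
--     # Invariant: T(lo) <= max_value < T(hi)  (T(0)=0, and T(m+2) >= m+2 > m).
--     lo, hi = 0, max_value + 2
--     while hi - lo > 1:
--         mid = (lo + hi) // 2
--         if mid * (mid + 1) // 2 <= max_value:
--             lo = mid
--         else:
--             hi = mid
--     # Emit T(1)..T(lo) by the additive recurrence T(k+1) = T(k) + (k+1):
--     # no per-element bound test, multiplication or division.
--     result = set()
--     t = 1
--     for k in range(1, lo + 1):
--         result.add(t)
--         t += k + 1
--     return result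
-- ===== Notes on version B (the rewrite author's own statement) =====
-- stated objective: alternative
-- what changed: Replaces A's probe-until-overflow loop (test n(n+1)//2 against the bound at every step) by a logarithmic binary search for the largest valid index, then a single additive prefix-sum pass t += k+1 that emits the triangle numbers with no per-element bound test, multiplication or division.
import Mathlib
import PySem

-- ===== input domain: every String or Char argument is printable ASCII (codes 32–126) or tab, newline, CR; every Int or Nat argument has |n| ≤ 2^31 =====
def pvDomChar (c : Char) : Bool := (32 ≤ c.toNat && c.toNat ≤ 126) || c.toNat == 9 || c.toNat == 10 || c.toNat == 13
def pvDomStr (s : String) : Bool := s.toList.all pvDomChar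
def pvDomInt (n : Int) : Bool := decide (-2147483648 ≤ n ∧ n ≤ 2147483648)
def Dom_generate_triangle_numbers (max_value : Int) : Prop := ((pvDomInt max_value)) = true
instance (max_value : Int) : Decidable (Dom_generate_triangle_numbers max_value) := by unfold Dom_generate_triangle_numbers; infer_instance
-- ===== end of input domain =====

-- B replaces A's probe-until-overflow loop by a binary search for the largest valid
-- index followed by an additive prefix-sum emission pass (objective: alternative).

-- ===== PORT A =====
-- A's 'while True' loop: n starts at 1 and increases; the 1 ≤ n proof argument
-- justifies termination (triangle_num ≥ n, so n ≤ max_value while the loop runs).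
def pvTriLoop (max_value : Int) (n : Int) (acc : PySem.Set Int) (hn : 1 ≤ n) : PySem.Set Int :=
  let triangle_num := PySem.Int.floordiv (n * (n + 1)) 2
  if triangle_num > max_value then acc
  else pvTriLoop max_value (n + 1) (PySem.Set.add acc triangle_num) (by omega)
termination_by (max_value + 1 - n).toNat
decreasing_by
  rename_i h
  simp only [not_lt] at h
  have h' : PySem.Int.floordiv (n * (n + 1)) 2 ≤ max_value := h
  rw [PySem.Int.floordiv_eq_ediv_of_pos (by omega : (0:Int) < 2)] at h'
  have hnn : n ≤ n * (n + 1) / 2 := by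
    have : 2 * n ≤ n * (n + 1) := by nlinarith
    omega
  omega

def generate_triangle_numbers (max_value : Int) : List Int :=
  pvTriLoop max_value 1 PySem.Set.empty (by omega)

-- ===== PORT B =====
-- B's 'while hi - lo > 1' bisection loop
def pvBisect (max_value lo hi : Int) : Int :=
  if _h : hi - lo > 1 then
    let mid := PySem.Int.floordiv (lo + hi) 2
    if PySem.Int.floordiv (mid * (mid + 1)) 2 ≤ max_value then
      pvBisect max_value mid hi
    else
      pvBisect max_value lo mid
  else lo
termination_by (hi - lo).toNat
decreasing_by
  all_goals
    simp only [PySem.Int.floordiv_eq_ediv_of_pos (by omega : (0:Int) < 2)]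
    omega

def generate_triangle_numbers_alt (max_value : Int) : List Int :=
  if max_value < 0 then []
  else
    let lo := pvBisect max_value 0 (max_value + 2)
    -- B's 'for k in range(1, lo+1)' emission loop with state (result, t)
    ((PySem.List.pyRange 1 (lo + 1) 1).foldl
      (fun (st : List Int × Int) k => (PySem.Set.add st.1 st.2, st.2 + k + 1))
      (PySem.Set.empty, 1)).1

-- ===== PRECONDITION & SPEC =====
def Spec_generate_triangle_numbers (max_value : Int) (out : List Int) : Prop := out = generate_triangle_numbers_alt max_value
instance (max_value : Int) (out : List Int) : Decidable (Spec_generate_triangle_numbers max_value out) := by unfold Spec_generate_triangle_numbers; infer_instance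

-- ===== CLAIM (what is proved, stated in full; the proofs are below) =====
def Claim_equal_generate_triangle_numbers : Prop := ∀ (max_value : Int), Dom_generate_triangle_numbers max_value → Spec_generate_triangle_numbers max_value (generate_triangle_numbers max_value)

-- ===== LEMMAS AND PROOFS =====

-- T k = k(k+1)//2, the triangle number both ports compute
def pvT (k : Int) : Int := PySem.Int.floordiv (k * (k + 1)) 2

theorem pvT_eq (k : Int) : 2 * pvT k = k * (k + 1) := by
  unfold pvT
  rw [PySem.Int.floordiv_eq_ediv_of_pos (by omega : (0:Int) < 2)]
  have : (2:Int) ∣ k * (k + 1) := (Int.even_mul_succ_self k).two_dvd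
  omega

theorem pvT_lt_pvT {a b : Int} (ha : 0 ≤ a) (hab : a < b) : pvT a < pvT b := by
  have h1 := pvT_eq a
  have h2 := pvT_eq b
  nlinarith

theorem pvT_le_pvT {a b : Int} (ha : 0 ≤ a) (hab : a ≤ b) : pvT a ≤ pvT b := by
  rcases eq_or_lt_of_le hab with rfl | h
  · exact le_refl _
  · exact le_of_lt (pvT_lt_pvT ha h)

-- elements of the accumulator are pvT of 1..n-1, all < pvT n, so Set.add appends
theorem pvT_not_mem (n : Int) (_hn : 1 ≤ n) :
    pvT n ∉ (PySem.List.pyRange 1 n 1).map pvT := by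
  intro hmem
  rcases List.mem_map.mp hmem with ⟨k, hk, hkeq⟩
  rw [PySem.List.mem_pyRange_one] at hk
  have := pvT_lt_pvT (a := k) (b := n) (by omega) hk.2
  omega

theorem pvSet_add_pvT (n : Int) (hn : 1 ≤ n) :
    PySem.Set.add ((PySem.List.pyRange 1 n 1).map pvT) (pvT n)
      = (PySem.List.pyRange 1 (n + 1) 1).map pvT := by
  have hnm := pvT_not_mem n hn
  unfold PySem.Set.add
  rw [if_neg]
  · rw [PySem.List.pyRange_one_succ_right (by omega : (1:Int) ≤ n), List.map_append]
    simp
  · simp only [PySem.Set.contains]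
    simpa [List.elem_eq_mem] using hnm

-- A's loop, characterized against any N with pvT N ≤ m < pvT (N+1)
theorem pvLoop_eq (m N : Int) (_hN0 : 0 ≤ N) (hle : pvT N ≤ m) (hgt : m < pvT (N + 1)) :
    ∀ (fuel : Nat) (n : Int) (hn : 1 ≤ n), n ≤ N + 1 → (N + 1 - n).toNat ≤ fuel →
      pvTriLoop m n ((PySem.List.pyRange 1 n 1).map pvT) hn
        = (PySem.List.pyRange 1 (N + 1) 1).map pvT := by
  intro fuel
  induction fuel with
  | zero =>
    intro n hn hle' hf
    have hnN : n = N + 1 := by omega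
    subst hnN
    rw [pvTriLoop.eq_def]
    simp only [gt_iff_lt]
    have hgt' : m < PySem.Int.floordiv ((N + 1) * (N + 1 + 1)) 2 := hgt
    rw [if_pos hgt']
  | succ f ih =>
    intro n hn hle' hf
    rw [pvTriLoop.eq_def]
    simp only [gt_iff_lt]
    by_cases h : m < PySem.Int.floordiv (n * (n + 1)) 2
    · have hnotle : ¬ (n ≤ N) := by
        intro hcon
        have hmono := pvT_le_pvT (a := n) (b := N) (by omega) hcon
        have : m < pvT N := lt_of_lt_of_le h hmono
        omega
      have hnN : n = N + 1 := by omega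
      subst hnN
      rw [if_pos h]
    · rw [if_neg h]
      have hnle : n ≤ N := by
        by_contra hcon
        have hnN : n = N + 1 := by omega
        subst hnN
        exact h hgt
      rw [show PySem.Int.floordiv (n * (n + 1)) 2 = pvT n from rfl, pvSet_add_pvT n hn]
      exact ih (n + 1) (by omega) (by omega) (by omega)

-- B's bisection maintains pvT lo ≤ m < pvT hi and returns the largest valid index
theorem pvBisect_spec (m : Int) :
    ∀ (fuel : Nat) (lo hi : Int), (hi - lo).toNat ≤ fuel →
      0 ≤ lo → lo < hi → pvT lo ≤ m → m < pvT hi →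
      0 ≤ pvBisect m lo hi ∧ pvT (pvBisect m lo hi) ≤ m ∧ m < pvT (pvBisect m lo hi + 1) := by
  intro fuel
  induction fuel with
  | zero =>
    intro lo hi hf h0 hlt hle hgt
    omega
  | succ f ih =>
    intro lo hi hf h0 hlt hle hgt
    rw [pvBisect.eq_def]
    by_cases h : hi - lo > 1
    · rw [dif_pos h]
      have hmid : lo < PySem.Int.floordiv (lo + hi) 2 ∧ PySem.Int.floordiv (lo + hi) 2 < hi := by
        rw [PySem.Int.floordiv_eq_ediv_of_pos (by omega : (0:Int) < 2)]
        omega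
      set mid := PySem.Int.floordiv (lo + hi) 2 with hm
      by_cases hc : PySem.Int.floordiv (mid * (mid + 1)) 2 ≤ m
      · simp only [if_pos hc]
        exact ih mid hi (by omega) (by omega) hmid.2 hc hgt
      · simp only [if_neg hc]
        have hgt' : m < pvT mid := by
          have : ¬ (pvT mid ≤ m) := hc
          omega
        exact ih lo mid (by omega) h0 hmid.1 hle hgt'
    · rw [dif_neg h]
      have hhi : hi = lo + 1 := by omega
      exact ⟨h0, hle, by rw [← hhi]; exact hgt⟩

-- B's emission loop: additive recurrence produces the map of pvT over the index range
theorem pvEmit_eq (N : Int) :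
    ∀ (fuel : Nat) (j : Int), 1 ≤ j → j ≤ N + 1 → (N + 1 - j).toNat ≤ fuel →
      (PySem.List.pyRange j (N + 1) 1).foldl
        (fun (st : List Int × Int) k => (PySem.Set.add st.1 st.2, st.2 + k + 1))
        ((PySem.List.pyRange 1 j 1).map pvT, pvT j)
      = ((PySem.List.pyRange 1 (N + 1) 1).map pvT, pvT (N + 1)) := by
  intro fuel
  induction fuel with
  | zero =>
    intro j hj hjN hf
    have hjN' : j = N + 1 := by omega
    subst hjN'
    rw [PySem.List.pyRange_one_eq_nil (le_refl (N + 1))]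
    rfl
  | succ f ih =>
    intro j hj hjN hf
    rcases eq_or_lt_of_le hjN with hEnd | hLt
    · subst hEnd
      rw [PySem.List.pyRange_one_eq_nil (le_refl (N + 1))]
      rfl
    · rw [PySem.List.pyRange_one_cons hLt, List.foldl_cons]
      have hstep : (PySem.Set.add ((PySem.List.pyRange 1 j 1).map pvT) (pvT j), pvT j + j + 1)
          = ((PySem.List.pyRange 1 (j + 1) 1).map pvT, pvT (j + 1)) := by
        rw [pvSet_add_pvT j hj]
        have h1 := pvT_eq j
        have h2 := pvT_eq (j + 1)
        have : pvT j + j + 1 = pvT (j + 1) := by nlinarith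
        rw [this]
      rw [hstep]
      exact ih (j + 1) (by omega) (by omega) (by omega)

-- ===== VERDICT (by name: the statement is the Claim_ definition above) =====
theorem generate_triangle_numbers_spec : Claim_equal_generate_triangle_numbers := by
  intro m _
  unfold Spec_generate_triangle_numbers generate_triangle_numbers generate_triangle_numbers_alt
  by_cases hm : m < 0
  · rw [if_pos hm, pvTriLoop.eq_def]
    have h1 : m < PySem.Int.floordiv (1 * (1 + 1)) 2 := by
      have : PySem.Int.floordiv (1 * (1 + 1)) 2 = 1 := by decide
      omega
    simp only [gt_iff_lt]
    rw [if_pos h1]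
    rfl
  · rw [if_neg hm]
    have hT0 : pvT 0 ≤ m := by
      have := pvT_eq 0
      omega
    have hThi : m < pvT (m + 2) := by
      have := pvT_eq (m + 2)
      nlinarith
    obtain ⟨hN0, hle, hgt⟩ := pvBisect_spec m (m + 2 - 0).toNat 0 (m + 2) (by omega)
      (by omega) (by omega) hT0 hThi
    set N := pvBisect m 0 (m + 2) with hN
    have hA : pvTriLoop m 1 PySem.Set.empty (by omega)
        = (PySem.List.pyRange 1 (N + 1) 1).map pvT := by
      have hstart : ((PySem.List.pyRange 1 1 1).map pvT) = PySem.Set.empty := by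
        simp [PySem.Set.empty]
      rw [← hstart]
      exact pvLoop_eq m N hN0 hle hgt (N + 1 - 1).toNat 1 (by omega) (by omega) (by omega)
    have hB : ((PySem.List.pyRange 1 (N + 1) 1).foldl
        (fun (st : List Int × Int) k => (PySem.Set.add st.1 st.2, st.2 + k + 1))
        (PySem.Set.empty, 1)).1 = (PySem.List.pyRange 1 (N + 1) 1).map pvT := by
      have hstart : ((PySem.List.pyRange 1 1 1).map pvT, pvT 1) = ((PySem.Set.empty : List Int), (1 : Int)) := by
        have : pvT 1 = 1 := by decide
        simp [PySem.Set.empty, this]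
      rw [← hstart, pvEmit_eq N (N + 1 - 1).toNat 1 (by omega) (by omega) (by omega)]
    rw [hA, hB]
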